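-- pv_equiv track=rewrite | github.com/faelern/advent_of_code | day09/part2.py | get_prev_value
-- ===== SOURCE A (Python) =====
-- def get_prev_value(left_values):
--     left_values.reverse()
--     temp = 0
--     x = 0
--     for i in range(1, len(left_values)):
--         x = left_values[i] - temp
--         temp = x
--     return x
-- ===== SOURCE B (Python) =====
-- def get_prev_value(left_values):
--     left_values.reverse()
--     total = 0
--     sign = 1
--     for v in left_values[::-1][:-1]:
--         total += sign * v
--         sign = -sign
--     return total
-- ===== Notes on version B (the rewrite author's own statement) =====
-- stated objective: simpler
-- what changed: Replaces the temp/x accumulator recurrence over range indices by a direct alternating sum with a toggling sign over the sliced (reversed, last-dropped) list; same in-place reverse side effect.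
import Mathlib
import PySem

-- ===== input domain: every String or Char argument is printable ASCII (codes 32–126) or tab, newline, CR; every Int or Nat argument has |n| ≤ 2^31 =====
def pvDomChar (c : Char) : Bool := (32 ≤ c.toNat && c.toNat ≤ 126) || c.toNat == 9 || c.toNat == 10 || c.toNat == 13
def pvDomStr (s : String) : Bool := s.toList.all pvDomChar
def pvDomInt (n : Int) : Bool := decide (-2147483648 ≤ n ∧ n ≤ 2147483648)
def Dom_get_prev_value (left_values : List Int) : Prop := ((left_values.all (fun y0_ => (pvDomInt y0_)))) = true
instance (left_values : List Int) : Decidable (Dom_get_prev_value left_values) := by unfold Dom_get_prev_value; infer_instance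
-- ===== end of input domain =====

-- B replaces A's temp/x accumulator recurrence by a direct alternating sum with a toggling
-- sign (objective: simpler). Both Pythons reverse the argument list in place; the equivalence
-- proved here is about the return value (the mutation is identical in A and B anyway).

-- ===== PORT A =====
-- left_values.reverse(); temp = 0; x = 0; for i in range(1, len(left_values)): x = lv[i] - temp; temp = x; return x
def get_prev_value (left_values : List Int) : Int :=
  let lv := left_values.reverse
  let st := (PySem.List.pyRange 1 (lv.length : Int) 1).foldl
    (fun (s : Int × Int) i =>
      -- s = (temp, x); the index i is always in range, so pyGetD is exact here
      let x := PySem.List.pyGetD lv i 0 - s.1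
      (x, x)) ((0 : Int), (0 : Int))
  st.2

-- ===== PORT B =====
-- left_values.reverse(); total = 0; sign = 1; for v in left_values[::-1][:-1]: total += sign*v; sign = -sign; return total
def get_prev_value_alt (left_values : List Int) : Int :=
  let lv := left_values.reverse
  let rev := (PySem.List.slice? lv none none (-1)).getD []   -- lv[::-1]; step -1 never raises
  let st := (PySem.List.slice rev none (some (-1))).foldl    -- rev[:-1]
    (fun (s : Int × Int) v => (s.1 + s.2 * v, -s.2)) ((0 : Int), (1 : Int))
  st.1

-- ===== PRECONDITION & SPEC =====
def Spec_get_prev_value (left_values : List Int) (out : Int) : Prop := out = get_prev_value_alt left_values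
instance (left_values : List Int) (out : Int) : Decidable (Spec_get_prev_value left_values out) := by unfold Spec_get_prev_value; infer_instance

-- ===== CLAIM (what is proved, stated in full; the proofs are below) =====
def Claim_equal_get_prev_value : Prop := ∀ (left_values : List Int), Dom_get_prev_value left_values → Spec_get_prev_value left_values (get_prev_value left_values)

-- ===== LEMMAS AND PROOFS =====

-- alternating sum with leading +: altsum [a,b,c] = a - (b - c)
def altsum : List Int → Int
  | [] => 0
  | a :: t => a - altsum t

theorem altsum_append_singleton (M : List Int) (a : Int) :
    altsum (M ++ [a]) = altsum M + (-1) ^ M.length * a := by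
  induction M with
  | nil => simp [altsum]
  | cons x M ih => simp [altsum, ih, pow_succ]; ring

-- A's loop: forward recurrence x := v - x over L starting from (c, c)
theorem loopA (L : List Int) (c : Int) :
    (L.foldl (fun (s : Int × Int) v => (v - s.1, v - s.1)) (c, c)).2
      = altsum L.reverse + (-1) ^ L.length * c := by
  induction L generalizing c with
  | nil => simp [altsum]
  | cons a L ih =>
      simp only [List.foldl_cons, List.reverse_cons, List.length_cons]
      rw [ih (a - c), altsum_append_singleton, pow_succ]
      simp [List.length_reverse]
      ring

-- B's loop: toggling-sign accumulation
theorem loopB (L : List Int) (t s : Int) :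
    (L.foldl (fun (p : Int × Int) v => (p.1 + p.2 * v, -p.2)) (t, s)).1
      = t + s * altsum L := by
  induction L generalizing t s with
  | nil => simp [altsum]
  | cons a L ih =>
      simp only [List.foldl_cons]
      rw [ih]
      simp [altsum]
      ring

-- ===== VERDICT (by name: the statement is the Claim_ definition above) =====
theorem get_prev_value_spec : Claim_equal_get_prev_value := by
  intro lv _
  unfold Spec_get_prev_value get_prev_value get_prev_value_alt
  simp only [PySem.List.slice?_none_none_neg_one, Option.getD_some,
    PySem.List.slice_to_neg_one, List.reverse_reverse]
  rw [PySem.List.foldl_pyRange_pyGetD' lv.reverse 0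
        (fun (s : Int × Int) v => (v - s.1, v - s.1)) ((0:Int),(0:Int)) (by norm_num : (0:Int) ≤ 1)]
  rw [loopA, loopB]
  simp [List.drop_one, List.tail_reverse]
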